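-- pv_equiv track=rewrite | github.com/kawasin73/nested_csv | nested_csv/writer.py | build_array_id_fields
-- ===== SOURCE A (Python) =====
-- class FieldConflictError(ValueError):
--     pass
--
-- KEY_ARRAY_ID = '[id]'
--
-- def build_array_id_fields(fields, array_fields):
--     id_fields = [[] for _ in array_fields]
--     for name, field in fields.items():
--         try:
--             idx = field.index(KEY_ARRAY_ID)
--         except ValueError:
--             # "[id]" is not included in this field
--             continue
--
--         # "[id]" must come last of field name
--         if idx + 1 != len(field):
--             raise FieldConflictError('{} includes invalid [id]'.format(name))
--
--         match = False
--         for id_field, (arrays, _) in zip(id_fields, array_fields):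
--             if len(arrays[0]) != idx:
--                 # level not match
--                 continue
--             if field[:idx] not in arrays:
--                 raise FieldConflictError('{} prefix not match'.format(name))
--             id_field.append(name)
--             match = True
--         if not match:
--             raise FieldConflictError('{} not match any array'.format(name))
--     return id_fields
-- ===== SOURCE B (Python) =====
-- KEY_ARRAY_ID = '[id]'
--
-- def build_array_id_fields(fields, array_fields):
--     # Transposed traversal: for each array entry, collect (in field order) the
--     # names of fields that are a terminal "[id]" field at this entry's level.
--     return [[name for name, field in fields.items()
--              if field and field[-1] == KEY_ARRAY_ID
--              and arrays and len(field) - 1 == len(arrays[0])]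
--             for arrays, _ in array_fields]
-- ===== Notes on version B (the rewrite author's own statement) =====
-- stated objective: simpler
-- what changed: Replaces A's stateful per-field loop (mutating id_fields, try/except index, match flag, raising) by a transposed nested comprehension: for each array entry collect the matching field names directly; the validation A performs only to raise exceptions is dropped, and exactly those raising inputs are excluded by Pre_.
import Mathlib
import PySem

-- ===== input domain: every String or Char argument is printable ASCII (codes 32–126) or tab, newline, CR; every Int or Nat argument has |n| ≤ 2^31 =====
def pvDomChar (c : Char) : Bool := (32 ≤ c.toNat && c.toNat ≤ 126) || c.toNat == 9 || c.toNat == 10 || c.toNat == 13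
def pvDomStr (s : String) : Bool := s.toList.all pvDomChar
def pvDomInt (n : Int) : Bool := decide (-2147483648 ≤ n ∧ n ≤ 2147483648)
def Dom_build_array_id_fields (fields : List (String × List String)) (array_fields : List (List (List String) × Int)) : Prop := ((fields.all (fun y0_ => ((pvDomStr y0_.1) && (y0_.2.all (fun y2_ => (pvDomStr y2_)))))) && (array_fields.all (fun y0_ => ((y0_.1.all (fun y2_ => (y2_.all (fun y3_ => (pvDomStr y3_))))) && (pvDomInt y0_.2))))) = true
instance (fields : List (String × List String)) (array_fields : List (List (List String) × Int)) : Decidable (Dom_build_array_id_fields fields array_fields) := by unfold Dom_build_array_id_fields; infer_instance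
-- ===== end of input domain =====

-- B replaces A's stateful per-field loop (try/except, in-place appends, match flag,
-- raising) by a transposed per-array-entry comprehension; objective: simpler.
-- Inputs on which A raises (FieldConflictError / IndexError) are excluded by Pre_.

-- ===== PORT A =====
-- inner 'for id_field, (arrays, _) in zip(id_fields, array_fields)' loop;
-- Option none = an exception (IndexError from arrays[0] / FieldConflictError)
def innerA (name : String) (field : List String) (idx : Nat) :
    List (List String) → List (List (List String) × Int) → Bool → Option (List (List String) × Bool)
  | [], _, m => some ([], m)
  | a :: as, [], m => some (a :: as, m)
  | a :: as, q :: qs, m =>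
    match PySem.List.pyGet? q.1 0 with
    | none => none
    | some first =>
      if first.length ≠ idx then
        (innerA name field idx as qs m).map (fun r => (a :: r.1, r.2))
      else if field.take idx ∈ q.1 then
        (innerA name field idx as qs true).map (fun r => ((a ++ [name]) :: r.1, r.2))
      else none

-- outer 'for name, field in fields.items()' loop
def loopA (af : List (List (List String) × Int)) :
    List (String × List String) → List (List String) → Option (List (List String))
  | [], acc => some acc
  | (name, field) :: rest, acc =>
    match PySem.List.index? field "[id]" with
    | none => loopA af rest acc
    | some idx =>
      if idx + 1 = field.length then
        match innerA name field idx acc af false with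
        | none => none
        | some r => if r.2 then loopA af rest r.1 else none
      else none

def build_array_id_fields (fields : List (String × List String)) (array_fields : List (List (List String) × Int)) : List (List String) :=
  (loopA array_fields fields (array_fields.map fun _ => [])).getD []

-- ===== PORT B =====
-- 'field and field[-1] == KEY_ARRAY_ID and arrays and len(field) - 1 == len(arrays[0])'
def bMatch (q : List (List String) × Int) (p : String × List String) : Bool :=
  (p.2.getLast? == some "[id]") && (q.1.head?.map List.length == some (p.2.length - 1))

def build_array_id_fields_alt (fields : List (String × List String)) (array_fields : List (List (List String) × Int)) : List (List String) :=
  array_fields.map (fun q => (fields.filter (bMatch q)).map Prod.fst)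

-- ===== PRECONDITION & SPEC =====
-- conditions A checks for one field containing '[id]' (it raises unless they all hold)
def IdOK (array_fields : List (List (List String) × Int)) (field : List String) : Prop :=
  "[id]" ∉ field.dropLast ∧ field.getLast? = some "[id]" ∧
  (∀ q ∈ array_fields, q.1 ≠ [] ∧
     (q.1.head?.map List.length = some (field.length - 1) → field.dropLast ∈ q.1)) ∧
  (∃ q ∈ array_fields, q.1.head?.map List.length = some (field.length - 1))

-- Pre_ = exactly the inputs on which A returns normally (A raises FieldConflictError
-- or IndexError on all others)
def Pre_build_array_id_fields (fields : List (String × List String)) (array_fields : List (List (List String) × Int)) : Prop :=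
  ∀ p ∈ fields, "[id]" ∈ p.2 → IdOK array_fields p.2

instance (fields : List (String × List String)) (array_fields : List (List (List String) × Int)) : Decidable (Pre_build_array_id_fields fields array_fields) := by
  unfold Pre_build_array_id_fields IdOK; infer_instance

def pvWitness_build_array_id_fields : (List (String × List String)) × (List (List (List String) × Int)) :=
  ([("a", ["x", "[id]"])], [([["x"]], 0)])

def Spec_build_array_id_fields (fields : List (String × List String)) (array_fields : List (List (List String) × Int)) (out : List (List String)) : Prop := out = build_array_id_fields_alt fields array_fields
instance (fields : List (String × List String)) (array_fields : List (List (List String) × Int)) (out : List (List String)) : Decidable (Spec_build_array_id_fields fields array_fields out) := by unfold Spec_build_array_id_fields; infer_instance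

-- ===== CLAIM (what is proved, stated in full; the proofs are below) =====
def Claim_equal_build_array_id_fields : Prop := ∀ (fields : List (String × List String)) (array_fields : List (List (List String) × Int)), Dom_build_array_id_fields fields array_fields → Pre_build_array_id_fields fields array_fields → Spec_build_array_id_fields fields array_fields (build_array_id_fields fields array_fields)


-- ===== LEMMAS AND PROOFS =====

theorem zip_nil_right (af : List (List (List String) × Int)) :
    ∀ (acc : List (List String)), acc.length = af.length →
    List.zipWith (fun a b => a ++ b) acc (af.map fun _ => ([] : List String)) = acc := by
  induction af with
  | nil => intro acc h; simp_all
  | cons q qs ih =>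
    intro acc h
    cases acc with
    | nil => simp at h
    | cons a as => simp only [List.map_cons, List.zipWith_cons_cons, List.append_nil,
        ih as (by simpa using h)]

theorem zip_nil_left (af : List (List (List String) × Int))
    (g : (List (List String) × Int) → List String) :
    List.zipWith (fun a b => a ++ b) (af.map fun _ => ([] : List String)) (af.map g) = af.map g := by
  induction af with
  | nil => simp
  | cons q qs ih => simp only [List.map_cons, List.zipWith_cons_cons, List.nil_append, ih]

theorem zip_step (name : String) (C : (List (List String) × Int) → Prop) [DecidablePred C]
    (g : (List (List String) × Int) → List String) :
    ∀ (af : List (List (List String) × Int)) (acc : List (List String)), acc.length = af.length →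
    List.zipWith (fun a b => a ++ b)
      (List.zipWith (fun a q => if C q then a ++ [name] else a) acc af) (af.map g)
    = List.zipWith (fun a b => a ++ b) acc
        (af.map fun q => if C q then name :: g q else g q) := by
  intro af
  induction af with
  | nil => intro acc _; simp
  | cons q qs ih =>
    intro acc hlen
    cases acc with
    | nil => simp at hlen
    | cons a as =>
      simp only [List.map_cons, List.zipWith_cons_cons]
      rw [ih as (by simpa using hlen)]
      by_cases hC : C q
      · simp [hC]
      · simp [hC]

-- first '[id]' sits at the last index when it is the last element and nowhere earlier
theorem index_last (field : List String)
    (h1 : "[id]" ∉ field.dropLast) (h2 : field.getLast? = some "[id]") :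
    PySem.List.index? field "[id]" = some (field.length - 1) := by
  have hne : field ≠ [] := by intro h; subst h; simp at h2
  have hl : field.getLast hne = "[id]" := by
    have h3 := List.getLast?_eq_some_getLast (l := field) hne
    rw [h3] at h2; exact Option.some.inj h2
  refine (PySem.List.index?_eq_some_iff _ _ _).mpr ⟨field.dropLast, [], ?_, by simp, h1⟩
  conv_lhs => rw [← List.dropLast_append_getLast hne, hl]

theorem inner_eq (name : String) (field : List String) (idx : Nat) :
    ∀ (af : List (List (List String) × Int)) (acc : List (List String)) (m : Bool),
    acc.length = af.length →
    (∀ q ∈ af, q.1 ≠ [] ∧ (q.1.head?.map List.length = some idx → field.take idx ∈ q.1)) →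
    innerA name field idx acc af m =
      some (List.zipWith (fun a q => if q.1.head?.map List.length = some idx then a ++ [name] else a) acc af,
            m || af.any (fun q => q.1.head?.map List.length == some idx)) := by
  intro af
  induction af with
  | nil => intro acc m hlen _; cases acc with
    | nil => simp [innerA]
    | cons a as => simp at hlen
  | cons q qs ih =>
    intro acc m hlen hq
    cases acc with
    | nil => simp at hlen
    | cons a as =>
      obtain ⟨b, bs, hb⟩ := List.exists_cons_of_ne_nil (hq q List.mem_cons_self).1
      have hget : PySem.List.pyGet? q.1 0 = some b := by
        rw [hb]; simp [PySem.List.pyGet?, PySem.List.pyIdx?]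
      have hhead : q.1.head?.map List.length = some b.length := by rw [hb]; simp
      have ihr := fun m' => ih as m' (by simpa using hlen) (fun r hr => hq r (List.mem_cons_of_mem _ hr))
      by_cases hbl : b.length = idx
      · have hcond : Option.map List.length q.1.head? = some idx := by rw [hhead, hbl]
        have hmem : field.take idx ∈ q.1 := (hq q List.mem_cons_self).2 hcond
        simp only [innerA, hget]
        rw [if_neg (by simp [hbl]), if_pos hmem, ihr true]
        simp only [Option.map_some, List.zipWith_cons_cons, List.any_cons, if_pos hcond]
        rw [show (Option.map List.length q.1.head? == some idx) = true from by simp [hcond]]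
        simp only [Bool.true_or, Bool.or_true]
      · have hcond : ¬ (Option.map List.length q.1.head? = some idx) := by rw [hhead]; simp [hbl]
        simp only [innerA, hget]
        rw [if_pos hbl, ihr m]
        simp only [Option.map_some, List.zipWith_cons_cons, List.any_cons, if_neg hcond]
        rw [show (Option.map List.length q.1.head? == some idx) = false from by simp [hcond]]
        simp only [Bool.false_or]

theorem loop_eq (af : List (List (List String) × Int)) :
    ∀ (fields : List (String × List String)) (acc : List (List String)),
    acc.length = af.length →
    (∀ p ∈ fields, "[id]" ∈ p.2 → IdOK af p.2) →
    loopA af fields acc =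
      some (List.zipWith (fun a b => a ++ b) acc (build_array_id_fields_alt fields af)) := by
  intro fields
  induction fields with
  | nil =>
    intro acc hlen _
    simp only [loopA, build_array_id_fields_alt, List.filter_nil, List.map_nil]
    congr 1
    exact (zip_nil_right af acc hlen).symm
  | cons p rest ih =>
    intro acc hlen hok
    obtain ⟨name, field⟩ := p
    by_cases hid : "[id]" ∈ field
    · obtain ⟨h1, h2, h3, h4⟩ := hok (name, field) List.mem_cons_self hid
      have hne : field ≠ [] := by intro h; subst h; simp at h2
      have hidx := index_last field h1 h2
      have htake : field.take (field.length - 1) = field.dropLast := List.dropLast_eq_take.symm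
      have hinner := inner_eq name field (field.length - 1) af acc false hlen
        (fun q hqmem => ⟨(h3 q hqmem).1, fun hlev => htake ▸ (h3 q hqmem).2 hlev⟩)
      have hany : (af.any (fun q => q.1.head?.map List.length == some (field.length - 1))) = true := by
        rcases h4 with ⟨q, hqmem, hq⟩
        exact List.any_eq_true.mpr ⟨q, hqmem, by simp [hq]⟩
      have hlen1 : 0 < field.length := List.length_pos_iff.mpr hne
      simp only [loopA, hidx]
      rw [if_pos (by omega), hinner]
      simp only [hany, Bool.false_or, if_true]
      rw [ih _ (by simp [hlen]) (fun r hr h => hok r (List.mem_cons_of_mem _ hr) h)]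
      congr 1
      have hmatch : ∀ q : List (List String) × Int,
          bMatch q (name, field) = (q.1.head?.map List.length == some (field.length - 1)) := by
        intro q; simp [bMatch, h2]
      have hmap : af.map (fun q => (((name, field) :: rest).filter (bMatch q)).map Prod.fst)
          = af.map (fun q => if q.1.head?.map List.length = some (field.length - 1)
              then name :: (rest.filter (bMatch q)).map Prod.fst
              else (rest.filter (bMatch q)).map Prod.fst) := by
        apply List.map_congr_left
        intro q _
        simp only [List.filter_cons, hmatch q]
        by_cases hc : q.1.head?.map List.length = some (field.length - 1)
        · simp [hc]
        · simp [hc]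
      simp only [build_array_id_fields_alt, hmap]
      exact zip_step name (fun q => q.1.head?.map List.length = some (field.length - 1))
        (fun q => (rest.filter (bMatch q)).map Prod.fst) af acc hlen
    · have hnone : PySem.List.index? field "[id]" = none := (PySem.List.index?_eq_none_iff _ _).mpr hid
      have hhd : (fun q : List (List String) × Int => bMatch q (name, field)) = fun _ => false := by
        funext q; simp only [bMatch]
        have : field.getLast? ≠ some "[id]" := by
          intro h; exact hid (List.mem_of_getLast? h)
        simp [this]
      simp only [loopA, hnone]
      rw [ih acc hlen (fun r hr h => hok r (List.mem_cons_of_mem _ hr) h)]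
      simp only [build_array_id_fields_alt, List.filter_cons]
      congr 2
      apply List.map_congr_left
      intro q _
      rw [congrFun hhd q]
      simp

-- ===== VERDICT (by name: the statement is the Claim_ definition above) =====
theorem build_array_id_fields_spec : Claim_equal_build_array_id_fields := by
  intro fields af _ hpre
  unfold Spec_build_array_id_fields build_array_id_fields
  rw [loop_eq af fields (af.map fun _ => []) (by simp) hpre]
  simp only [Option.getD_some]
  exact zip_nil_left af _
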